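-- pv_equiv track=rewrite | github.com/SEIN126/ThisIsCodingTest | week01/wonseok/MUZIsLiveMukbang_wonseok.py | solution
-- ===== SOURCE A (Python) =====
-- from operator import itemgetter
--
-- def solution(food_times, k):
--     food_dict = []
--     food_len = len(food_times)
--     # (걸리는 시간, 음식 번호) 의 list를 만든다.
--     for i in range(food_len):
--         food_dict.append((food_times[i], i + 1))
--     # 걸리는 시간 순으로 list를 정렬한다.
--     food_dict.sort()
--
--     # 걸리는 시간이 작은것 순으로 남은 음식갯수를 곱해서 빼준다
--     prev_time = 0
--     for i, food in enumerate(food_dict):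
--         # 현재 음식과 이전 음식 걸리는 시간의 차이
--         diff_time = food[0] - prev_time
--
--         # 시간의 차이가 있으면
--         if diff_time != 0:
--             spent = diff_time * food_len
--             if spent <= k:
--                 k -= spent
--                 prev_time = food[0]
--             else:
--                 k %= food_len
--                 left = sorted(food_dict[i:], key = itemgetter(1))
--                 return left[k][1]
--
--         food_len -= 1
--
--     return -1
-- ===== SOURCE B (Python) =====
-- def solution(food_times, k):
--     # Binary search on the answer: find the largest whole level t with
--     # sum(min(ft, t)) <= k, then index the survivors directly; no sorting at all.
--     if not food_times or sum(food_times) <= k: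
--         return -1
--     n = len(food_times)
--     lo = min(min(food_times), k // n)   # cost(lo) <= k
--     hi = max(food_times)                # cost(hi) = sum(food_times) > k
--     while hi - lo > 1:
--         mid = (lo + hi) // 2
--         if sum(min(ft, mid) for ft in food_times) <= k:
--             lo = mid
--         else:
--             hi = mid
--     r = k - sum(min(ft, lo) for ft in food_times)
--     survivors = [i + 1 for i, ft in enumerate(food_times) if ft > lo]
--     return survivors[r]
-- ===== Notes on version B (the rewrite author's own statement) =====
-- stated objective: alternative
-- what changed: B replaces A's sort-and-sweep over (time,index) pairs (build pairs, sort, enumerate-scan, re-sort the survivors) by a binary search on the stop level: the largest t with sum(min(ft,t)) <= k, then indexes the survivors of the original list directly; no sorting at all.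
-- outside the precondition, e.g. on solution([0, 0, 5, 7], -3): A returns 4, B returns 2
import Mathlib
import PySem

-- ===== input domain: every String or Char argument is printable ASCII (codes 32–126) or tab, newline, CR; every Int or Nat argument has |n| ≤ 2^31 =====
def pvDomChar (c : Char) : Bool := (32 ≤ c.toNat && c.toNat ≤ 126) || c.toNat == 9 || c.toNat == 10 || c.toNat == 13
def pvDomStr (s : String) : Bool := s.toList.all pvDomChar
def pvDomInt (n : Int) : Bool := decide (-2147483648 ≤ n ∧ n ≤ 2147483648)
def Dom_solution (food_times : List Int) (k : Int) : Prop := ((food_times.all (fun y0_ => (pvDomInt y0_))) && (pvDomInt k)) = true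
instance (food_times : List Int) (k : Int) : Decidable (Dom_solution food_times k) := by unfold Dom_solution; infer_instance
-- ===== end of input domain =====

-- B replaces A's sort-and-sweep over (time, index) pairs by a binary search on the
-- stop level (largest t with sum(min(ft,t)) <= k), indexing survivors of the
-- original list directly; alternative algorithm, no sorting at all.

-- ===== PORT A =====
-- the loop `for i, food in enumerate(food_dict): ...` of A; the suffix argument is food_dict[i:]
def solLoopA : List (Int × Int) → Int → Int → Int → Int
  | [], _, _, _ => -1
  | (t, i) :: tail, prev_time, k, food_len =>
    let diff_time := t - prev_time
    if diff_time ≠ 0 then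
      let spent := diff_time * food_len
      if spent ≤ k then
        solLoopA tail t (k - spent) (food_len - 1)
      else
        let k' := PySem.Int.mod k food_len
        let left := PySem.List.sorted ((t, i) :: tail) Prod.snd false
        -- left[k'][1]; the index is always in range when reached from `solution`
        ((PySem.List.pyGet? left k').map Prod.snd).getD 0
    else
      solLoopA tail prev_time k (food_len - 1)

def solution (food_times : List Int) (k : Int) : Int :=
  let food_dict := (PySem.List.pyRange 0 (food_times.length : Int) 1).foldl
      (fun acc i => acc ++ [(PySem.List.pyGetD food_times i 0, i + 1)]) []
  solLoopA (PySem.List.sorted2 food_dict Prod.fst Prod.snd false) 0 k (food_times.length : Int)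

-- ===== PORT B =====
-- the `while hi - lo > 1:` binary search of Source B
def bsearchB (food_times : List Int) (k : Int) (lo hi : Int) : Int :=
  if 1 < hi - lo then
    let mid := PySem.Int.floordiv (lo + hi) 2
    if (food_times.map (fun ft => min ft mid)).sum ≤ k then
      bsearchB food_times k mid hi
    else
      bsearchB food_times k lo mid
  else lo
  termination_by (hi - lo).toNat
  decreasing_by
  · rw [PySem.Int.floordiv_eq_ediv_of_pos (by norm_num)]; omega
  · rw [PySem.Int.floordiv_eq_ediv_of_pos (by norm_num)]; omega

def solution_alt (food_times : List Int) (k : Int) : Int :=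
  if food_times.isEmpty || decide (food_times.sum ≤ k) then -1
  else
    let n : Int := (food_times.length : Int)
    -- min(food_times) / max(food_times): the list is nonempty here
    let lo := min ((PySem.List.min? food_times (fun x => x)).getD 0) (PySem.Int.floordiv k n)
    let hi := (PySem.List.max? food_times (fun x => x)).getD 0
    let t := bsearchB food_times k lo hi
    let r := k - (food_times.map (fun ft => min ft t)).sum
    let survivors := (PySem.List.enumerate food_times).filterMap
        (fun p => if t < p.2 then some (p.1 + 1) else none)
    -- survivors[r]; the index is always in range when reached (proved below)
    (PySem.List.pyGet? survivors r).getD 0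

-- ===== PRECONDITION & SPEC =====
-- Pre_ restricts to the natural domain of the problem, a nonnegative available time k.
-- For k < 0 A still returns a value, but it is an artefact of Python's modulo
-- wraparound of the leftover loop counter (A never simulates negative time), and B's
-- level search legitimately differs there (see the cite in claim.json).
def Pre_solution (food_times : List Int) (k : Int) : Prop := 0 ≤ k
instance (food_times : List Int) (k : Int) : Decidable (Pre_solution food_times k) := by
  unfold Pre_solution; infer_instance

def pvWitness_solution : List Int × Int := ([3, 1, 2], 5)

def Spec_solution (food_times : List Int) (k : Int) (out : Int) : Prop := out = solution_alt food_times k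
instance (food_times : List Int) (k : Int) (out : Int) : Decidable (Spec_solution food_times k out) := by unfold Spec_solution; infer_instance

-- ===== CLAIM (what is proved, stated in full; the proofs are below) =====
def Claim_equal_solution : Prop := ∀ (food_times : List Int) (k : Int), Dom_solution food_times k → Pre_solution food_times k → Spec_solution food_times k (solution food_times k)

-- ===== LEMMAS AND PROOFS =====

-- the cost of eating every food down to level t: sum(min(x, t))
def cost (ft : List Int) (t : Int) : Int := (ft.map (fun x => min x t)).sum

-- B's selection, as a function of the found level t
def selB (ft : List Int) (k t : Int) : Int :=
  (PySem.List.pyGet?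
    ((PySem.List.enumerate ft).filterMap (fun p => if t < p.2 then some (p.1 + 1) else none))
    (k - cost ft t)).getD 0

theorem cost_mono (ft : List Int) {t u : Int} (h : t ≤ u) : cost ft t ≤ cost ft u := by
  induction ft with
  | nil => simp [cost]
  | cons x xs ih =>
    simp only [cost, List.map_cons, List.sum_cons] at *
    have : min x t ≤ min x u := by omega
    omega

theorem cost_le_sum (ft : List Int) (t : Int) : cost ft t ≤ ft.sum := by
  induction ft with
  | nil => simp [cost]
  | cons x xs ih =>
    simp only [cost, List.map_cons, List.sum_cons] at *
    have : min x t ≤ x := by omega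
    omega

theorem cost_perm {l l' : List Int} (h : l.Perm l') (t : Int) : cost l t = cost l' t :=
  (h.map _).sum_eq

-- between two levels with no food value strictly inside, cost is linear
theorem cost_gap (ft : List Int) (u v t : Int) (hgap : ∀ x ∈ ft, x ≤ u ∨ v ≤ x)
    (huv : u < v) (h1 : u ≤ t) (h2 : t ≤ v) :
    cost ft t = cost ft u + (t - u) * (ft.countP (fun x => decide (u < x)) : Int) := by
  induction ft with
  | nil => simp [cost]
  | cons x xs ih =>
    have hx := hgap x (by simp)
    have ih' := ih (fun y hy => hgap y (by simp [hy]))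
    simp only [cost, List.map_cons, List.sum_cons, List.countP_cons] at *
    rcases hx with hx | hx
    · have e1 : min x t = x := by omega
      have e2 : min x u = x := by omega
      have e3 : (decide (u < x) : Bool) = false := by simp; omega
      rw [e1, e2, ih']
      simp [e3]
      ring
    · have e1 : min x t = t := by omega
      have e2 : min x u = u := by omega
      have e3 : (decide (u < x) : Bool) = true := by simp; omega
      rw [e1, e2, ih']
      simp [e3]
      push_cast
      ring

theorem cost_of_le_min (ft : List Int) (t : Int) (h : ∀ x ∈ ft, t ≤ x) :
    cost ft t = t * ft.length := by
  induction ft with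
  | nil => simp [cost]
  | cons x xs ih =>
    have hx := h x (by simp)
    have ih' := ih (fun y hy => h y (by simp [hy]))
    simp only [cost, List.map_cons, List.sum_cons, List.length_cons] at *
    have e1 : min x t = t := by omega
    rw [e1, ih']
    push_cast
    ring

theorem cost_of_max_le (ft : List Int) (t : Int) (h : ∀ x ∈ ft, x ≤ t) :
    cost ft t = ft.sum := by
  induction ft with
  | nil => simp [cost]
  | cons x xs ih =>
    have hx := h x (by simp)
    have := ih (fun y hy => h y (by simp [hy]))
    simp only [cost, List.map_cons, List.sum_cons] at *
    have : min x t = x := by omega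
    omega

-- Python's k % L for 0 < L, given a decomposition into quotient and remainder
theorem pymod_eq (kc L q r : Int) (hL : 0 < L) (h : kc = q * L + r)
    (h0 : 0 ≤ r) (h1 : r < L) : PySem.Int.mod kc L = r := by
  rw [PySem.Int.mod_eq_emod_of_pos hL]
  have hkc : kc = r + L * q := by rw [h]; ring
  rw [hkc, Int.add_mul_emod_self_left]
  exact Int.emod_eq_of_lt h0 h1

theorem filterMap_ite_congr {α β : Type} (p q : α → Prop) [DecidablePred p] [DecidablePred q]
    (f : α → β) (l : List α) (h : ∀ a ∈ l, p a ↔ q a) :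
    l.filterMap (fun a => if p a then some (f a) else none)
      = l.filterMap (fun a => if q a then some (f a) else none) := by
  induction l with
  | nil => rfl
  | cons x xs ih =>
    have hx := h x (by simp)
    have ih' := ih (fun y hy => h y (by simp [hy]))
    by_cases hp : p x
    · simp [List.filterMap_cons, hp, hx.1 hp, ih']
    · have hq : ¬ q x := fun hq => hp (hx.2 hq)
      simp [List.filterMap_cons, hp, hq, ih']

-- A's food_dict, in closed form
def fdict (food_times : List Int) : List (Int × Int) :=
  (PySem.List.enumerate food_times).map (fun p => (p.2, p.1 + 1))

theorem fdict_eq_fold (food_times : List Int) :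
    (PySem.List.pyRange 0 (food_times.length : Int) 1).foldl
      (fun acc i => acc ++ [(PySem.List.pyGetD food_times i 0, i + 1)]) []
    = fdict food_times := by
  rw [PySem.List.foldl_append_singleton_eq_map]
  simp [fdict, PySem.List.enumerate_eq_map_pyRange food_times 0, List.map_map]

theorem map_fst_fdict (food_times : List Int) : (fdict food_times).map Prod.fst = food_times := by
  have := PySem.List.map_snd_enumerate food_times 0
  simp [fdict, List.map_map, Function.comp_def]

theorem fdict_pairwise_snd (food_times : List Int) :
    (fdict food_times).Pairwise (fun a b => a.2 < b.2) := by
  exact List.Pairwise.map _ (by intro a b hab; simpa using hab)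
    (by simpa using PySem.List.pairwise_lt_enumerate food_times 0)

-- insertion sort keeps a transitive invariant respected by the comparison
theorem insertBy_pairwise {α : Type} (before : α → α → Bool) (R : α → α → Prop)
    (htrans : ∀ a b c, R a b → R b c → R a c)
    (h1 : ∀ a b, before a b = true → R a b) (h2 : ∀ a b, before a b = false → R b a)
    (x : α) (l : List α) (hl : l.Pairwise R) :
    (PySem.List.insertBy before x l).Pairwise R := by
  induction l with
  | nil => simp [PySem.List.insertBy]
  | cons y ys ih =>
    rcases List.pairwise_cons.1 hl with ⟨hy, hys⟩
    by_cases h : before x y = true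
    · simp only [PySem.List.insertBy, h]
      refine List.pairwise_cons.2 ⟨?_, hl⟩
      intro z hz
      rcases List.mem_cons.1 hz with rfl | hz
      · exact h1 _ _ h
      · exact htrans _ _ _ (h1 _ _ h) (hy z hz)
    · have h' : before x y = false := by simpa using h
      show (PySem.List.insertBy before x (y :: ys)).Pairwise R
      have : PySem.List.insertBy before x (y :: ys) = y :: PySem.List.insertBy before x ys := by
        simp [PySem.List.insertBy, h']
      rw [this]
      refine List.pairwise_cons.2 ⟨?_, ih hys⟩
      intro z hz
      have : z = x ∨ z ∈ ys := by
        simpa using (PySem.List.mem_insertBy before x z ys).1 hz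
      rcases this with rfl | hz'
      · exact h2 _ _ h'
      · exact hy z hz'

theorem foldl_insertBy_pairwise {α : Type} (before : α → α → Bool) (R : α → α → Prop)
    (htrans : ∀ a b c, R a b → R b c → R a c)
    (h1 : ∀ a b, before a b = true → R a b) (h2 : ∀ a b, before a b = false → R b a)
    (l : List α) (acc : List α) (hacc : acc.Pairwise R) :
    (l.foldl (fun acc x => PySem.List.insertBy before x acc) acc).Pairwise R := by
  induction l generalizing acc with
  | nil => simpa
  | cons x xs ih => exact ih _ (insertBy_pairwise before R htrans h1 h2 x acc hacc)

theorem sorted2_pairwise_fst (xs : List (Int × Int)) :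
    (PySem.List.sorted2 xs Prod.fst Prod.snd false).Pairwise (fun a b => a.1 ≤ b.1) := by
  unfold PySem.List.sorted2
  apply foldl_insertBy_pairwise
  · intro a b c; omega
  · intro a b h
    simp only [Bool.false_eq_true, if_false, Bool.or_eq_true, Bool.and_eq_true,
      decide_eq_true_eq, Bool.not_eq_true', decide_eq_false_iff_not, not_lt] at h
    rcases h with h | ⟨h, _⟩ <;> omega
  · intro a b h
    simp only [Bool.false_eq_true, if_false, Bool.or_eq_false_iff, Bool.and_eq_false_iff,
      decide_eq_false_iff_not, not_lt] at h
    exact h.1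
  · exact List.Pairwise.nil

theorem pyGet?_map {α β : Type} (f : α → β) (xs : List α) (i : Int) :
    PySem.List.pyGet? (xs.map f) i = (PySem.List.pyGet? xs i).map f := by
  simp [PySem.List.pyGet?, PySem.List.pyIdx?]

theorem filterMap_if_eq_map_filter {α β : Type} (p : α → Prop) [DecidablePred p] (f : α → β) (l : List α) :
    l.filterMap (fun x => if p x then some (f x) else none)
      = (l.filter (fun x => decide (p x))).map f := by
  induction l with
  | nil => rfl
  | cons x xs ih => by_cases h : p x <;> simp [h, ih]

-- A's loop walks through a run of items whose time equals prev by just decrementing food_len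
theorem solLoopA_skip_run (run : List (Int × Int)) : ∀ (tail' : List (Int × Int)) (prev k L : Int),
    (∀ p ∈ run, p.1 = prev) →
    solLoopA (run ++ tail') prev k L = solLoopA tail' prev k (L - run.length) := by
  induction run with
  | nil => intro tail' prev k L _; simp
  | cons p run ih =>
    intro tail' prev k L hrun
    obtain ⟨t, i⟩ := p
    have ht : t = prev := hrun (t, i) (by simp)
    have h0 : t - prev = 0 := by omega
    simp only [List.cons_append, solLoopA, h0, ne_eq, not_true_eq_false, if_false]
    rw [ih tail' prev k (L - 1) (fun q hq => hrun q (by simp [hq]))]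
    congr 1
    simp
    omega

-- the selection made at the stop: sorted(food_dict[i:], key=itemgetter(1)) projected to
-- indices equals the index scan of the original list
theorem stop_selection (food_times : List Int) (t : Int) (rest : List (Int × Int))
    (hflt : (PySem.List.sorted2 (fdict food_times) Prod.fst Prod.snd false).filter
              (fun p => decide (t ≤ p.1)) = rest) :
    (PySem.List.sorted rest Prod.snd false).map Prod.snd
      = (PySem.List.enumerate food_times).filterMap
          (fun p => if t ≤ p.2 then some (p.1 + 1) else none) := by
  have hperm : ((fdict food_times).filter (fun p => decide (t ≤ p.1))).Perm rest := by
    rw [← hflt]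
    exact ((PySem.List.sorted2_perm (fdict food_times) Prod.fst Prod.snd false).filter _).symm
  have hpw : ((fdict food_times).filter (fun p => decide (t ≤ p.1))).Pairwise
      (fun a b => a.2 < b.2) :=
    (fdict_pairwise_snd food_times).sublist List.filter_sublist
  rw [PySem.List.sorted_eq_of_perm_of_pairwise_lt rest _ Prod.snd hperm hpw]
  rw [filterMap_if_eq_map_filter (fun p : Int × Int => t ≤ p.2) (fun p => p.1 + 1)]
  simp [fdict, List.filter_map, List.map_map, Function.comp_def]


theorem sum_of_all_eq (l : List Int) (c : Int) (h : ∀ x ∈ l, x = c) :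
    l.sum = c * l.length := by
  induction l with
  | nil => simp
  | cons x xs ih =>
    have hx := h x (by simp)
    have ih' := ih (fun y hy => h y (by simp [hy]))
    simp only [List.sum_cons, List.length_cons, ih', hx]
    push_cast
    ring

theorem cost_append (l1 l2 : List Int) (t : Int) :
    cost (l1 ++ l2) t = cost l1 t + cost l2 t := by
  simp [cost]

theorem cost_split (l1 l2 : List Int) (v : Int)
    (h1 : ∀ x ∈ l1, x ≤ v) (h2 : ∀ x ∈ l2, v ≤ x) :
    cost (l1 ++ l2) v = l1.sum + v * l2.length := by
  rw [cost_append, cost_of_max_le _ _ h1, cost_of_le_min _ _ h2]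

-- the combined characterization of A's loop from an arbitrary reachable state
theorem A_char (ft : List Int) (k : Int) (N : Nat) :
    ∀ (rest pre : List (Int × Int)) (prev : Int),
      rest.length ≤ N →
      PySem.List.sorted2 (fdict ft) Prod.fst Prod.snd false = pre ++ rest →
      (∀ p ∈ pre, p.1 ≤ prev) →
      (pre = [] → prev = 0) →
      (pre ≠ [] → prev ∈ pre.map Prod.fst) →
      0 ≤ k - ((pre.map Prod.fst).sum + prev * rest.length) →
      (ft.sum ≤ k →
        solLoopA rest prev (k - ((pre.map Prod.fst).sum + prev * rest.length)) rest.length = -1)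
      ∧ (∀ tstar, cost ft tstar ≤ k → k < cost ft (tstar + 1) →
        solLoopA rest prev (k - ((pre.map Prod.fst).sum + prev * rest.length)) rest.length
          = selB ft k tstar) := by
  induction N with
  | zero =>
    intro rest pre prev hlen hP hpre hpre0 hwit hkc
    have hrest : rest = [] := List.length_eq_zero_iff.1 (Nat.le_zero.1 hlen)
    subst hrest
    have hperm0 : ((PySem.List.sorted2 (fdict ft) Prod.fst Prod.snd false).map Prod.fst).Perm ft := by
      have h := (PySem.List.sorted2_perm (fdict ft) Prod.fst Prod.snd false).map Prod.fst
      rw [map_fst_fdict] at h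
      exact h
    have hsum : (pre.map Prod.fst).sum = ft.sum := by
      have h := hperm0.sum_eq
      rw [hP] at h
      simpa using h
    simp only [List.length_nil, Nat.cast_zero, mul_zero, hsum] at hkc ⊢
    constructor
    · intro _; simp [solLoopA]
    · intro tstar h1 h2
      have h3 := cost_le_sum ft (tstar + 1)
      omega
  | succ N ih =>
    intro rest pre prev hlen hP hpre hpre0 hwit hkc
    match rest with
    | [] =>
      have hperm0 : ((PySem.List.sorted2 (fdict ft) Prod.fst Prod.snd false).map Prod.fst).Perm ft := by
        have h := (PySem.List.sorted2_perm (fdict ft) Prod.fst Prod.snd false).map Prod.fst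
        rw [map_fst_fdict] at h
        exact h
      have hsum : (pre.map Prod.fst).sum = ft.sum := by
        have h := hperm0.sum_eq
        rw [hP] at h
        simpa using h
      simp only [List.length_nil, Nat.cast_zero, mul_zero, hsum] at hkc ⊢
      constructor
      · intro _; simp [solLoopA]
      · intro tstar h1 h2
        have h3 := cost_le_sum ft (tstar + 1)
        omega
    | (v, i) :: tail =>
    -- order facts from the sorted prefix decomposition
    have hPpw := sorted2_pairwise_fst (fdict ft)
    rw [hP] at hPpw
    have hsplitpw := List.pairwise_append.1 hPpw
    have hrestpw : ((v, i) :: tail).Pairwise (fun a b : Int × Int => a.1 ≤ b.1) := hsplitpw.2.1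
    have hcross : ∀ p ∈ pre, ∀ q ∈ (v, i) :: tail, p.1 ≤ q.1 := hsplitpw.2.2
    have htailge : ∀ q ∈ tail, v ≤ q.1 := (List.pairwise_cons.1 hrestpw).1
    -- the run of equal times at the head
    set run := tail.takeWhile (fun p => decide (p.1 = v)) with hrun_def
    set tail' := tail.dropWhile (fun p => decide (p.1 = v)) with htail'_def
    have htail : run ++ tail' = tail := List.takeWhile_append_dropWhile
    have hrunfst : ∀ p ∈ run, p.1 = v := by
      intro p hp
      have := List.mem_takeWhile_imp hp
      simpa using this
    have htail'ge : ∀ q ∈ tail', v ≤ q.1 := fun q hq =>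
      htailge q (by rw [← htail]; exact List.mem_append_right _ hq)
    have hlen_tail : tail.length = run.length + tail'.length := by
      rw [← htail]; simp
    have htail'_le : tail'.length ≤ N := by
      simp only [List.length_cons] at hlen; omega
    -- the multiset of food times, split along the decomposition
    have hperm : ft.Perm ((pre.map Prod.fst) ++ (((v, i) :: tail).map Prod.fst)) := by
      have h := (PySem.List.sorted2_perm (fdict ft) Prod.fst Prod.snd false).map Prod.fst
      rw [map_fst_fdict, hP, List.map_append] at h
      exact h.symm
    -- abbreviations
    have hrunsum : (((v, i) :: run).map Prod.fst).sum = v * (run.length + 1) := by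
      have := sum_of_all_eq (((v, i) :: run).map Prod.fst) v (by
        intro x hx
        simp only [List.map_cons, List.mem_cons, List.mem_map] at hx
        rcases hx with rfl | ⟨p, hp, rfl⟩
        · rfl
        · exact hrunfst p hp)
      simpa using this
    have hP' : PySem.List.sorted2 (fdict ft) Prod.fst Prod.snd false
        = (pre ++ (v, i) :: run) ++ tail' := by
      rw [hP, ← htail]; simp
    by_cases hd : v = prev
    · -- a run of foods whose time equals prev: A just decrements the counter
      have h0 : v - prev = 0 := by omega
      have hstep : ∀ kc : Int,
          solLoopA ((v, i) :: tail) prev kc (((v, i) :: tail).length : Int)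
            = solLoopA tail' prev kc ((tail'.length : Int)) := by
        intro kc
        simp only [solLoopA, h0, ne_eq, not_true_eq_false, if_false]
        rw [← htail, solLoopA_skip_run run tail' prev kc _ (fun p hp => (hrunfst p hp).trans hd)]
        congr 1
        simp only [List.length_cons, List.length_append]
        push_cast
        omega
      have hkeq : k - (((pre ++ (v, i) :: run).map Prod.fst).sum + prev * tail'.length)
          = k - ((pre.map Prod.fst).sum + prev * (((v, i) :: tail).length : Int)) := by
        simp only [List.map_append, List.sum_append, hrunsum, List.length_cons]
        push_cast [hlen_tail]
        rw [hd]
        ring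
      have ihres := ih tail' (pre ++ (v, i) :: run) prev htail'_le hP'
        (by
          intro p hp
          rcases List.mem_append.1 hp with h | h
          · exact hpre p h
          · rcases List.mem_cons.1 h with rfl | h
            · exact le_of_eq hd
            · exact le_of_eq ((hrunfst p h).trans hd))
        (by intro h; exact absurd h (by simp))
        (by
          intro _
          simp only [List.map_append, List.map_cons]
          rw [← hd]
          exact List.mem_append_right _ (by simp))
        (by rw [hkeq]; exact hkc)
      rw [hkeq] at ihres
      exact ⟨fun hsum => by rw [hstep]; exact ihres.1 hsum,
             fun t h1 h2 => by rw [hstep]; exact ihres.2 t h1 h2⟩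
    · -- v ≠ prev: A either pays for the whole level or stops here
      have hdiff : v - prev ≠ 0 := by omega
      have hprev_le_v : ∀ p ∈ pre, p.1 ≤ v := by
        intro p hp
        exact hcross p hp (v, i) (by simp)
      have hcostv : cost ft v = (pre.map Prod.fst).sum + v * (((v, i) :: tail).length : Int) := by
        rw [cost_perm hperm v, cost_split _ _ v
          (by intro x hx; rcases List.mem_map.1 hx with ⟨p, hp, rfl⟩; exact hprev_le_v p hp)
          (by
            intro x hx
            rcases List.mem_map.1 hx with ⟨p, hp, rfl⟩
            rcases List.mem_cons.1 hp with rfl | hp'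
            · rfl
            · exact htailge p hp')]
        simp
      by_cases hs : (v - prev) * (((v, i) :: tail).length : Int)
          ≤ k - ((pre.map Prod.fst).sum + prev * (((v, i) :: tail).length : Int))
      · -- A pays (v - prev) seconds for every remaining food and moves on
        have hstep :
            solLoopA ((v, i) :: tail) prev
              (k - ((pre.map Prod.fst).sum + prev * (((v, i) :: tail).length : Int)))
              (((v, i) :: tail).length : Int)
            = solLoopA tail' v
              (k - ((pre.map Prod.fst).sum + prev * (((v, i) :: tail).length : Int))
                 - (v - prev) * (((v, i) :: tail).length : Int))
              ((tail'.length : Int)) := by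
          simp only [solLoopA, hdiff, ne_eq, not_false_eq_true, if_true, hs, if_pos]
          rw [← htail, solLoopA_skip_run run tail' v _ _ (fun p hp => hrunfst p hp)]
          congr 1
          simp only [List.length_cons, List.length_append]
          push_cast
          omega
        have hkeq : k - (((pre ++ (v, i) :: run).map Prod.fst).sum + v * tail'.length)
            = k - ((pre.map Prod.fst).sum + prev * (((v, i) :: tail).length : Int))
              - (v - prev) * (((v, i) :: tail).length : Int) := by
          simp only [List.map_append, List.sum_append, hrunsum, List.length_cons]
          push_cast [hlen_tail]
          ring
        have ihres := ih tail' (pre ++ (v, i) :: run) v htail'_le hP'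
          (by
            intro p hp
            rcases List.mem_append.1 hp with h | h
            · exact hprev_le_v p h
            · rcases List.mem_cons.1 h with rfl | h
              · rfl
              · exact le_of_eq (hrunfst p h))
          (by intro h; exact absurd h (by simp))
          (by
            intro _
            simp only [List.map_append, List.map_cons]
            exact List.mem_append_right _ (by simp))
          (by rw [hkeq]; omega)
        rw [hkeq] at ihres
        exact ⟨fun hsum => by rw [hstep]; exact ihres.1 hsum,
               fun t h1 h2 => by rw [hstep]; exact ihres.2 t h1 h2⟩
      · -- A stops inside this level
        have hL : (0 : Int) < (((v, i) :: tail).length : Int) := by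
          simp only [List.length_cons]; push_cast; omega
        have hstop :
            solLoopA ((v, i) :: tail) prev
              (k - ((pre.map Prod.fst).sum + prev * (((v, i) :: tail).length : Int)))
              (((v, i) :: tail).length : Int)
            = ((PySem.List.pyGet?
                  (PySem.List.sorted ((v, i) :: tail) Prod.snd false)
                  (PySem.Int.mod
                    (k - ((pre.map Prod.fst).sum + prev * (((v, i) :: tail).length : Int)))
                    (((v, i) :: tail).length : Int))).map Prod.snd).getD 0 := by
          simp only [solLoopA, hdiff, ne_eq, not_false_eq_true, if_true, hs, if_neg]
        have hlt : prev < v := by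
          by_contra hc
          push_neg at hc
          have : (v - prev) * (((v, i) :: tail).length : Int) ≤ 0 :=
            mul_nonpos_iff.2 (Or.inr ⟨by omega, le_of_lt hL⟩)
          omega
        have hcostprev : cost ft prev
            = (pre.map Prod.fst).sum + prev * (((v, i) :: tail).length : Int) := by
          rw [cost_perm hperm prev, cost_split _ _ prev
            (by intro x hx; rcases List.mem_map.1 hx with ⟨p, hp, rfl⟩; exact hpre p hp)
            (by
              intro x hx
              rcases List.mem_map.1 hx with ⟨p, hp, rfl⟩
              rcases List.mem_cons.1 hp with rfl | hp'
              · omega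
              · have := htailge p hp'; omega)]
          simp
        have hgap : ∀ x ∈ ft, x ≤ prev ∨ v ≤ x := by
          intro x hx
          have hx' := hperm.mem_iff.1 hx
          rcases List.mem_append.1 hx' with h | h
          · rcases List.mem_map.1 h with ⟨p, hp, rfl⟩
            exact Or.inl (hpre p hp)
          · rcases List.mem_map.1 h with ⟨p, hp, rfl⟩
            rcases List.mem_cons.1 hp with rfl | hp'
            · exact Or.inr le_rfl
            · exact Or.inr (htailge p hp')
        have hcnt : ((ft.countP (fun x => decide (prev < x)) : Nat) : Int)
            = (((v, i) :: tail).length : Int) := by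
          rw [hperm.countP_eq]
          rw [List.countP_append]
          have h1 : (pre.map Prod.fst).countP (fun x => decide (prev < x)) = 0 := by
            rw [List.countP_eq_zero]
            intro x hx
            rcases List.mem_map.1 hx with ⟨p, hp, rfl⟩
            have := hpre p hp
            simp only [decide_eq_true_eq]
            omega
          have h2 : ((((v, i) :: tail).map Prod.fst).countP (fun x => decide (prev < x)))
              = (((v, i) :: tail).map Prod.fst).length := by
            rw [List.countP_eq_length]
            intro x hx
            rcases List.mem_map.1 hx with ⟨p, hp, rfl⟩
            rcases List.mem_cons.1 hp with rfl | hp'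
            · simp only [decide_eq_true_eq]; omega
            · have := htailge p hp'
              simp only [decide_eq_true_eq]
              omega
          rw [h1, h2]
          simp
        constructor
        · -- with total time ≤ k A would have paid; contradiction with the stop
          intro hsumk
          exfalso
          have := cost_le_sum ft v
          rw [hcostv] at this
          apply hs
          have : (pre.map Prod.fst).sum + v * (((v, i) :: tail).length : Int) ≤ k := by omega
          have hexp : (v - prev) * (((v, i) :: tail).length : Int)
              = ((pre.map Prod.fst).sum + v * (((v, i) :: tail).length : Int))
                - ((pre.map Prod.fst).sum + prev * (((v, i) :: tail).length : Int)) := by ring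
          omega
        · intro tstar h1 h2
          -- bounds on tstar
          have hkcost : k - cost ft prev ≥ 0 := by rw [hcostprev]; omega
          have hprevle : prev ≤ tstar := by
            by_contra hc
            push_neg at hc
            have : cost ft (tstar + 1) ≤ cost ft prev := cost_mono ft (by omega)
            omega
          have hvk : k < cost ft v := by
            rw [hcostv]
            have hexp : (v - prev) * (((v, i) :: tail).length : Int)
                = ((pre.map Prod.fst).sum + v * (((v, i) :: tail).length : Int))
                  - ((pre.map Prod.fst).sum + prev * (((v, i) :: tail).length : Int)) := by ring
            omega
          have htv : tstar < v := by
            by_contra hc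
            push_neg at hc
            have : cost ft v ≤ cost ft tstar := cost_mono ft hc
            omega
          have hct : cost ft tstar = cost ft prev
              + (tstar - prev) * (((v, i) :: tail).length : Int) := by
            rw [cost_gap ft prev v tstar hgap hlt hprevle (by omega), hcnt]
          have hct1 : cost ft (tstar + 1) = cost ft prev
              + (tstar + 1 - prev) * (((v, i) :: tail).length : Int) := by
            rw [cost_gap ft prev v (tstar + 1) hgap hlt (by omega) (by omega), hcnt]
          have hr0 : 0 ≤ k - cost ft tstar := by omega
          have hrL : k - cost ft tstar < (((v, i) :: tail).length : Int) := by
            have : cost ft (tstar + 1)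
                = cost ft tstar + (((v, i) :: tail).length : Int) := by
              rw [hct, hct1]; ring
            omega
          have hmod : PySem.Int.mod
              (k - ((pre.map Prod.fst).sum + prev * (((v, i) :: tail).length : Int)))
              (((v, i) :: tail).length : Int) = k - cost ft tstar := by
            apply pymod_eq _ _ (tstar - prev) _ hL _ hr0 hrL
            rw [← hcostprev, hct]
            ring
          -- the survivors, selected by original index
          have hfilter : (PySem.List.sorted2 (fdict ft) Prod.fst Prod.snd false).filter
              (fun p => decide (v ≤ p.1)) = (v, i) :: tail := by
            rw [hP, List.filter_append]
            have h1 : pre.filter (fun p => decide (v ≤ p.1)) = [] := by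
              apply List.filter_eq_nil_iff.2
              intro p hp
              have := hpre p hp
              simp only [decide_eq_true_eq]
              omega
            have h2 : (((v, i) :: tail)).filter (fun p => decide (v ≤ p.1))
                = (v, i) :: tail := by
              apply List.filter_eq_self.2
              intro p hp
              simp only [decide_eq_true_eq]
              rcases List.mem_cons.1 hp with rfl | hp'
              · exact le_rfl
              · exact htailge p hp'
            rw [h1, h2, List.nil_append]
          have hsel := stop_selection ft v ((v, i) :: tail) hfilter
          have hcongr : (PySem.List.enumerate ft).filterMap
                (fun p => if v ≤ p.2 then some (p.1 + 1) else none)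
              = (PySem.List.enumerate ft).filterMap
                (fun p => if tstar < p.2 then some (p.1 + 1) else none) := by
            apply filterMap_ite_congr
            intro p hp
            have hmem : p.2 ∈ ft := by
              rw [← PySem.List.map_snd_enumerate ft 0]
              exact List.mem_map_of_mem hp
            rcases hgap p.2 hmem with h | h <;> constructor <;> intro <;> omega
          rw [hstop, hmod, ← pyGet?_map, hsel, hcongr]
          rfl

-- the binary search of B finds the level t with cost(t) ≤ k < cost(t+1)
theorem bsearch_spec (ft : List Int) (k : Int) (N : Nat) :
    ∀ lo hi : Int, (hi - lo).toNat ≤ N → cost ft lo ≤ k → k < cost ft hi →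
      cost ft (bsearchB ft k lo hi) ≤ k ∧ k < cost ft (bsearchB ft k lo hi + 1) := by
  induction N with
  | zero =>
    intro lo hi hfuel hlo hhi
    have hno : ¬ (1 < hi - lo) := by omega
    rw [bsearchB, if_neg hno]
    refine ⟨hlo, ?_⟩
    have hlt : lo < hi := by
      by_contra hc
      push_neg at hc
      have := cost_mono ft hc
      omega
    have heq : hi = lo + 1 := by omega
    exact heq ▸ hhi
  | succ N ih =>
    intro lo hi hfuel hlo hhi
    rw [bsearchB]
    by_cases hgo : 1 < hi - lo
    · rw [if_pos hgo]
      have hmid : lo < PySem.Int.floordiv (lo + hi) 2 ∧ PySem.Int.floordiv (lo + hi) 2 < hi := by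
        rw [PySem.Int.floordiv_eq_ediv_of_pos (by norm_num)]
        omega
      by_cases hc : (ft.map (fun x => min x (PySem.Int.floordiv (lo + hi) 2))).sum ≤ k
      · rw [if_pos hc]
        exact ih _ hi (by omega) hc hhi
      · rw [if_neg hc]
        exact ih lo _ (by omega) hlo (by exact lt_of_not_ge hc)
    · rw [if_neg hgo]
      refine ⟨hlo, ?_⟩
      have hlt : lo < hi := by
        by_contra hc
        push_neg at hc
        have := cost_mono ft hc
        omega
      have heq : hi = lo + 1 := by omega
      exact heq ▸ hhi

theorem solution_eq (food_times : List Int) (k : Int) (hk : 0 ≤ k) :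
    solution food_times k = solution_alt food_times k := by
  by_cases hnil : food_times = []
  · subst hnil; rfl
  · have hlenS : (PySem.List.sorted2 (fdict food_times) Prod.fst Prod.snd false).length
        = food_times.length := by
      rw [(PySem.List.sorted2_perm (fdict food_times) Prod.fst Prod.snd false).length_eq]
      simp [fdict, PySem.List.length_enumerate]
    have hchar := A_char food_times k
      (PySem.List.sorted2 (fdict food_times) Prod.fst Prod.snd false).length
      (PySem.List.sorted2 (fdict food_times) Prod.fst Prod.snd false) [] 0 le_rfl
      (by simp) (by simp) (fun _ => rfl) (by intro h; exact absurd rfl h)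
      (by simpa using hk)
    simp only [List.map_nil, List.sum_nil, zero_mul, zero_add, sub_zero] at hchar
    have hA : solution food_times k
        = solLoopA (PySem.List.sorted2 (fdict food_times) Prod.fst Prod.snd false) 0 k
            ((PySem.List.sorted2 (fdict food_times) Prod.fst Prod.snd false).length : Int) := by
      unfold solution
      rw [fdict_eq_fold, hlenS]
    by_cases hsum : food_times.sum ≤ k
    · rw [hA, hchar.1 hsum]
      unfold solution_alt
      rw [if_pos (by simp [hsum])]
    · -- both sides select via the level found by the binary search
      obtain ⟨m, hm⟩ : ∃ m, PySem.List.min? food_times (fun x => x) = some m := by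
        rcases h : PySem.List.min? food_times (fun x => x) with _ | m
        · exact absurd ((PySem.List.min?_eq_none_iff _ _).1 h) hnil
        · exact ⟨m, rfl⟩
      obtain ⟨M, hM⟩ : ∃ M, PySem.List.max? food_times (fun x => x) = some M := by
        rcases h : PySem.List.max? food_times (fun x => x) with _ | M
        · exact absurd ((PySem.List.max?_eq_none_iff _ _).1 h) hnil
        · exact ⟨M, rfl⟩
      have hmmin := PySem.List.min?_isMin hm
      have hMmax := PySem.List.max?_isMax hM
      have hn : (0 : Int) < (food_times.length : Int) := by
        have := List.length_pos_iff.2 hnil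
        omega
      have hcostlo : cost food_times
          (min m (PySem.Int.floordiv k (food_times.length : Int))) ≤ k := by
        have h1 := cost_of_le_min food_times
          (min m (PySem.Int.floordiv k (food_times.length : Int)))
          (fun x hx => le_trans (min_le_left _ _) (hmmin x hx))
        have h2 : PySem.Int.floordiv k (food_times.length : Int) * (food_times.length : Int)
            ≤ k := (PySem.Int.le_floordiv_iff_mul_le hn).1 le_rfl
        have h3 : min m (PySem.Int.floordiv k (food_times.length : Int))
              * (food_times.length : Int)
            ≤ PySem.Int.floordiv k (food_times.length : Int) * (food_times.length : Int) :=
          mul_le_mul_of_nonneg_right (min_le_right _ _) (le_of_lt hn)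
        exact le_trans (le_of_eq h1) (le_trans h3 h2)
      have hcosthi : k < cost food_times M := by
        rw [cost_of_max_le food_times M hMmax]
        omega
      have tspec := bsearch_spec food_times k
        ((M - min m (PySem.Int.floordiv k (food_times.length : Int))).toNat)
        (min m (PySem.Int.floordiv k (food_times.length : Int))) M le_rfl hcostlo hcosthi
      have hB : solution_alt food_times k
          = selB food_times k
              (bsearchB food_times k
                (min m (PySem.Int.floordiv k (food_times.length : Int))) M) := by
        unfold solution_alt
        rw [if_neg (by simp [hnil, hsum])]
        simp only [hm, hM, Option.getD_some]
        rfl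
      rw [hA, hB, hchar.2 _ tspec.1 tspec.2]

-- ===== VERDICT (by name: the statement is the Claim_ definition above) =====
theorem solution_spec : Claim_equal_solution := by
  intro food_times k _ hk
  unfold Spec_solution
  exact solution_eq food_times k hk
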